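-- pv_equiv track=rewrite | github.com/pypi-data/pypi-mirror-80 | packages/tokenizer-tools/tokenizer_tools-0.46.1-py2.py3-none-any.whl/tokenizer_tools/evaluator/token/token_level.py | generate_word_offset_list
-- ===== SOURCE A (Python) =====
-- def generate_word_offset_list(word_list):
--     offset_list = []
--
--     start_index = 0
--     for word in word_list:
--         end_index = start_index + len(word)
--         offset_list.append((start_index, end_index))
--
--         start_index = end_index
--
--     return offset_list
-- ===== SOURCE B (Python) =====
-- def generate_word_offset_list(word_list):
--     # build the cumulative boundary table, then pair adjacent boundaries
--     bounds = [0]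
--     for w in word_list:
--         bounds.append(bounds[-1] + len(w))
--     return list(zip(bounds, bounds[1:]))
-- ===== Notes on version B (the rewrite author's own statement) =====
-- stated objective: alternative
-- what changed: Replaces the running-accumulator loop that appends (start,end) pairs with a two-phase decomposition: first build a prefix-sum boundary table, then zip adjacent boundaries into pairs.
import Mathlib
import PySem

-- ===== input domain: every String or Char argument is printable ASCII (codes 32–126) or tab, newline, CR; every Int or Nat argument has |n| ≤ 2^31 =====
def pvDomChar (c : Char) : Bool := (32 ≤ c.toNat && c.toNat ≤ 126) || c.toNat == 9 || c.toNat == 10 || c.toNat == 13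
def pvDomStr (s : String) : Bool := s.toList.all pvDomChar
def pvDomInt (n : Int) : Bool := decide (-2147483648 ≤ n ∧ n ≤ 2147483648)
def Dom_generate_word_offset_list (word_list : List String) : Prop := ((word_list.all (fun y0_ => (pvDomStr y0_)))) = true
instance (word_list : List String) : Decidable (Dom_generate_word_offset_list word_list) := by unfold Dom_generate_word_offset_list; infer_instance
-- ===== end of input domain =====

-- B builds a prefix-sum boundary table and pairs adjacent boundaries, instead of A's running-accumulator loop (alternative decomposition; same cost).

-- ===== PORT A =====
def generate_word_offset_list (word_list : List String) : List (Int × Int) :=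
  let st := word_list.foldl
    (fun (st : List (Int × Int) × Int) word =>
      let end_index := st.2 + PySem.Str.len word
      (st.1 ++ [(st.2, end_index)], end_index))
    ([], 0)
  st.1

-- ===== PORT B =====
def generate_word_offset_list_alt (word_list : List String) : List (Int × Int) :=
  let bounds := word_list.foldl
    (fun (b : List Int) w => b ++ [b.getLast! + PySem.Str.len w]) [0]
  bounds.zip bounds.tail

-- ===== PRECONDITION & SPEC =====
def Spec_generate_word_offset_list (word_list : List String) (out : List (Int × Int)) : Prop := out = generate_word_offset_list_alt word_list
instance (word_list : List String) (out : List (Int × Int)) : Decidable (Spec_generate_word_offset_list word_list out) := by unfold Spec_generate_word_offset_list; infer_instance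

-- ===== CLAIM (what is proved, stated in full; the proofs are below) =====
def Claim_equal_generate_word_offset_list : Prop := ∀ (word_list : List String), Dom_generate_word_offset_list word_list → Spec_generate_word_offset_list word_list (generate_word_offset_list word_list)

-- ===== LEMMAS AND PROOFS =====

-- reference specification: offsets starting at s
def pvOffs : List String → Int → List (Int × Int)
  | [], _ => []
  | w :: ws, s => (s, s + PySem.Str.len w) :: pvOffs ws (s + PySem.Str.len w)

-- cumulative end boundaries starting after s
def pvCum : List String → Int → List Int
  | [], _ => []
  | w :: ws, s => (s + PySem.Str.len w) :: pvCum ws (s + PySem.Str.len w)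

theorem foldlA_eq (ws : List String) : ∀ (acc : List (Int × Int)) (s : Int),
    (ws.foldl (fun (st : List (Int × Int) × Int) word =>
      ((st.1 ++ [(st.2, st.2 + PySem.Str.len word)], st.2 + PySem.Str.len word) : List (Int × Int) × Int))
      (acc, s)).1 = acc ++ pvOffs ws s := by
  induction ws with
  | nil => intro acc s; simp [pvOffs]
  | cons w ws ih =>
    intro acc s
    simp only [List.foldl_cons, pvOffs]
    rw [ih]
    simp

theorem foldlB_eq (ws : List String) : ∀ (b : List Int) (s : Int), b ≠ [] → b.getLast! = s →
    ws.foldl (fun (b : List Int) w => b ++ [b.getLast! + PySem.Str.len w]) b = b ++ pvCum ws s := by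
  induction ws with
  | nil => intro b s _ _; simp [pvCum]
  | cons w ws ih =>
    intro b s hb hlast
    simp only [List.foldl_cons, pvCum]
    rw [hlast]
    rw [ih (b ++ [s + PySem.Str.len w]) (s + PySem.Str.len w) (by simp)
      (by rw [List.getLast!_eq_getLast?_getD, List.getLast?_append]; rfl)]
    simp

theorem zip_cum (ws : List String) : ∀ (s : Int),
    (s :: pvCum ws s).zip (pvCum ws s) = pvOffs ws s := by
  induction ws with
  | nil => intro s; simp [pvCum, pvOffs]
  | cons w ws ih =>
    intro s
    simp only [pvCum, pvOffs, List.zip_cons_cons]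
    rw [← pvCum]  -- keep shape
    cases hws : ws with
    | nil => simp [pvCum, pvOffs]
    | cons w' ws' =>
      have := ih (s + PySem.Str.len w)
      simp only [hws] at this ⊢
      simp [pvCum, List.zip_cons_cons] at this ⊢
      exact this

-- ===== VERDICT (by name: the statement is the Claim_ definition above) =====
theorem generate_word_offset_list_spec : Claim_equal_generate_word_offset_list := by
  intro word_list _
  show generate_word_offset_list word_list = generate_word_offset_list_alt word_list
  unfold generate_word_offset_list generate_word_offset_list_alt
  rw [foldlA_eq word_list [] 0, foldlB_eq word_list [0] 0 (by simp) (by simp)]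
  simp only [List.nil_append, List.cons_append, List.nil_append, List.tail_cons]
  exact (zip_cum word_list 0).symm
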